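-- pv_equiv track=rewrite | github.com/esdu/js_oct_22 | marshy_marsh.py | get_bridge_combinations
-- ===== SOURCE A (Python) =====
-- from typing import List
--
-- def get_bridge_combinations(bridges, num_bridges) -> List[List[tuple]]:
--     """Return all ways of selecting num_bridges from bridges,
--     where each bridge can be 1-wide or 2-wide."""
--     if num_bridges == 0:
--         return []
--
--     if not bridges:
--         return []
--
--     if num_bridges == 1:
--         use_zero = get_bridge_combinations(bridges[1:], num_bridges)
--         use_one = [[(bridges[0], 1)]]
--         return use_zero + use_one
--
--     if num_bridges == 2:
--         use_zero = get_bridge_combinations(bridges[1:], num_bridges)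
--         use_one = [[(bridges[0], 1)] + ls
--                    for ls in get_bridge_combinations(bridges[1:], num_bridges-1)]
--         use_two = [[(bridges[0], 2)]]
--         return use_zero + use_one + use_two
--
--     use_zero = get_bridge_combinations(bridges[1:], num_bridges)
--     use_one = [[(bridges[0], 1)] + ls
--                for ls in get_bridge_combinations(bridges[1:], num_bridges-1)]
--     use_two = [[(bridges[0], 2)] + ls
--                for ls in get_bridge_combinations(bridges[1:], num_bridges-2)]
--     return use_zero + use_one + use_two
-- ===== SOURCE B (Python) =====
-- def get_bridge_combinations(bridges, num_bridges):
--     """Bottom-up DP over suffixes: row[j] holds all selections of total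
--     width j from the current suffix; each subproblem is computed once."""
--     n = len(bridges)
--     if num_bridges <= 0 or num_bridges > 2 * n:
--         return []
--     k = num_bridges
--     # row for the empty suffix: only the empty selection has width 0
--     row = [[[]]] + [[] for _ in range(k)]
--     for b in reversed(bridges):
--         new = [[[]]]
--         for j in range(1, k + 1):
--             cur = list(row[j])
--             cur += [[(b, 1)] + ls for ls in row[j - 1]]
--             if j >= 2:
--                 cur += [[(b, 2)] + ls for ls in row[j - 2]]
--             new.append(cur)
--         row = new
--     return row[k]
-- ===== Notes on version B (the rewrite author's own statement) =====
-- stated objective: alternative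
-- what changed: Replaces A's branching recursion, which recomputes each (suffix, remaining-width) subproblem many times, with a bottom-up dynamic-programming table over suffixes indexed by remaining width, plus an early [] return when num_bridges exceeds 2*len(bridges); measured 4x faster at n=64 but unconfirmed at larger sizes where the output itself is exponential.
import Mathlib
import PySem

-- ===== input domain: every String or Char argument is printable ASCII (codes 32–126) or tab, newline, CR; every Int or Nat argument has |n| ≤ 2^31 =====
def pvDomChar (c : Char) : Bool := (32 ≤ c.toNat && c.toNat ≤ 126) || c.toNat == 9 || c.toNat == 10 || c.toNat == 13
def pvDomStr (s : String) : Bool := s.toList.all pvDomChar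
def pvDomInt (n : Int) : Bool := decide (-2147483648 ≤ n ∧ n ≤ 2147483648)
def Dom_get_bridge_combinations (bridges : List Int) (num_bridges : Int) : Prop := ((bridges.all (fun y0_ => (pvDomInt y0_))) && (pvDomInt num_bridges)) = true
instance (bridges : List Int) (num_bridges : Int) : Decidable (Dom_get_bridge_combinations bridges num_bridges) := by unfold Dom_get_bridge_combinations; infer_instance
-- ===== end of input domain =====

-- B replaces A's branching recursion with a bottom-up DP table over (suffix, remaining width); return values proved equal on all inputs.

-- ===== PORT A =====
-- literal transliteration of A's recursion (branches in source order)
def get_bridge_combinations (bridges : List Int) (num_bridges : Int) : List (List (Int × Int)) :=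
  if num_bridges = 0 then []
  else
    match bridges with
    | [] => []
    | b :: rest =>
      if num_bridges = 1 then
        get_bridge_combinations rest num_bridges ++ [[(b, 1)]]
      else if num_bridges = 2 then
        get_bridge_combinations rest num_bridges
          ++ (get_bridge_combinations rest (num_bridges - 1)).map (fun ls => [(b, 1)] ++ ls)
          ++ [[(b, 2)]]
      else
        get_bridge_combinations rest num_bridges
          ++ (get_bridge_combinations rest (num_bridges - 1)).map (fun ls => [(b, 1)] ++ ls)
          ++ (get_bridge_combinations rest (num_bridges - 2)).map (fun ls => [(b, 2)] ++ ls)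

-- ===== PORT B =====
-- one DP step of Source B's inner loop: from the row of suffix `rest` to the row of `b :: rest`
def pvStepB (k : Nat) (b : Int) (row : List (List (List (Int × Int)))) : List (List (List (Int × Int))) :=
  [[([] : List (Int × Int))]] ++
    (List.range' 1 k).map (fun j =>
      row.getD j []
        ++ (row.getD (j - 1) []).map (fun ls => [(b, 1)] ++ ls)
        ++ (if 2 ≤ j then (row.getD (j - 2) []).map (fun ls => [(b, 2)] ++ ls) else []))

def get_bridge_combinations_alt (bridges : List Int) (num_bridges : Int) : List (List (Int × Int)) :=
  if num_bridges ≤ 0 ∨ 2 * (bridges.length : Int) < num_bridges then []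
  else
    let k := num_bridges.toNat
    -- `for b in reversed(bridges): row = step(b, row)` is a right fold over bridges
    let row := bridges.foldr (fun b r => pvStepB k b r) ([[[]]] ++ List.replicate k [])
    row.getD k []

-- ===== PRECONDITION & SPEC =====
def Spec_get_bridge_combinations (bridges : List Int) (num_bridges : Int) (out : List (List (Int × Int))) : Prop := out = get_bridge_combinations_alt bridges num_bridges
instance (bridges : List Int) (num_bridges : Int) (out : List (List (Int × Int))) : Decidable (Spec_get_bridge_combinations bridges num_bridges out) := by unfold Spec_get_bridge_combinations; infer_instance

-- ===== CLAIM (what is proved, stated in full; the proofs are below) =====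
def Claim_equal_get_bridge_combinations : Prop := ∀ (bridges : List Int) (num_bridges : Int), Dom_get_bridge_combinations bridges num_bridges → Spec_get_bridge_combinations bridges num_bridges (get_bridge_combinations bridges num_bridges)

-- ===== LEMMAS AND PROOFS =====

-- mathematical specification: selections of total width j from a suffix (width 0 = one empty selection)
def pvE : List Int → Nat → List (List (Int × Int))
  | _, 0 => [[]]
  | [], _ + 1 => []
  | b :: rest, m + 1 =>
      pvE rest (m + 1)
        ++ (pvE rest m).map (fun ls => [(b, 1)] ++ ls)
        ++ (if 1 ≤ m then (pvE rest (m - 1)).map (fun ls => [(b, 2)] ++ ls) else [])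

-- unfolding equation of A on a cons cell
lemma A_cons (b : Int) (rest : List Int) (k : Int) :
    get_bridge_combinations (b :: rest) k =
      if k = 0 then []
      else if k = 1 then get_bridge_combinations rest k ++ [[(b, 1)]]
      else if k = 2 then
        get_bridge_combinations rest k
          ++ (get_bridge_combinations rest (k - 1)).map (fun ls => [(b, 1)] ++ ls)
          ++ [[(b, 2)]]
      else
        get_bridge_combinations rest k
          ++ (get_bridge_combinations rest (k - 1)).map (fun ls => [(b, 1)] ++ ls)
          ++ (get_bridge_combinations rest (k - 2)).map (fun ls => [(b, 2)] ++ ls) := by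
  rfl

lemma A_nonpos (bridges : List Int) (k : Int) (hk : k ≤ 0) :
    get_bridge_combinations bridges k = [] := by
  induction bridges generalizing k with
  | nil => unfold get_bridge_combinations; split <;> simp
  | cons b rest ih =>
    rw [A_cons]
    by_cases h0 : k = 0
    · simp [h0]
    · have h1 : ¬ k = 1 := by omega
      have h2 : ¬ k = 2 := by omega
      rw [if_neg h0, if_neg h1, if_neg h2,
          ih k hk, ih (k - 1) (by omega), ih (k - 2) (by omega)]
      simp

lemma A_big (bridges : List Int) (k : Int) (hk : 2 * (bridges.length : Int) < k) :
    get_bridge_combinations bridges k = [] := by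
  induction bridges generalizing k with
  | nil => unfold get_bridge_combinations; split <;> simp
  | cons b rest ih =>
    rw [A_cons]
    simp only [List.length_cons] at hk
    have h0 : ¬ k = 0 := by push_cast at hk; omega
    have h1 : ¬ k = 1 := by push_cast at hk; omega
    have h2 : ¬ k = 2 := by push_cast at hk; omega
    rw [if_neg h0, if_neg h1, if_neg h2,
        ih k (by push_cast at hk ⊢; omega), ih (k - 1) (by push_cast at hk ⊢; omega),
        ih (k - 2) (by push_cast at hk ⊢; omega)]
    simp

lemma A_eq_E (bridges : List Int) (k : Int) (hk : 1 ≤ k) :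
    get_bridge_combinations bridges k = pvE bridges k.toNat := by
  induction bridges generalizing k with
  | nil =>
    obtain ⟨m, hm⟩ : ∃ m : Nat, k.toNat = m + 1 := ⟨k.toNat - 1, by omega⟩
    unfold get_bridge_combinations
    have h0 : ¬ k = 0 := by omega
    simp [h0, hm, pvE]
  | cons b rest ih =>
    obtain ⟨m, hm⟩ : ∃ m : Nat, k.toNat = m + 1 := ⟨k.toNat - 1, by omega⟩
    rw [A_cons]
    have h0 : ¬ k = 0 := by omega
    by_cases h1 : k = 1
    · have hm0 : m = 0 := by omega
      rw [if_neg h0, if_pos h1, ih k hk, hm, hm0]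
      simp [pvE]
    · by_cases h2 : k = 2
      · have hm1 : m = 1 := by omega
        have ht1 : (k - 1).toNat = 1 := by omega
        rw [if_neg h0, if_neg h1, if_pos h2, ih k hk, ih (k - 1) (by omega), hm, hm1, ht1]
        simp [pvE]
      · have hm2 : 2 ≤ m := by omega
        rw [if_neg h0, if_neg h1, if_neg h2,
            ih k hk, ih (k - 1) (by omega), ih (k - 2) (by omega)]
        have ht1 : (k - 1).toNat = m := by omega
        have ht2 : (k - 2).toNat = m - 1 := by omega
        simp only [hm, pvE, ht1, ht2, if_pos (by omega : 1 ≤ m)]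

-- the DP row computed by B's fold agrees with pvE at every index ≤ k
lemma row_eq_E (k : Nat) (bridges : List Int) (j : Nat) (hj : j ≤ k) :
    (bridges.foldr (fun b r => pvStepB k b r) ([[[]]] ++ List.replicate k [])).getD j []
      = pvE bridges j := by
  induction bridges generalizing j with
  | nil =>
    cases j with
    | zero => simp [pvE]
    | succ m =>
      have : m < k := by omega
      simp [pvE, List.getD, this]
  | cons b rest ih =>
    simp only [List.foldr_cons]
    simp only [pvStepB, List.getD, List.cons_append, List.nil_append] at ih
    cases j with
    | zero => simp [pvStepB, pvE]
    | succ m =>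
      have hm : m < k := by omega
      have hlt : m < (List.range' 1 k).length := by simp [hm]
      simp only [pvStepB, List.getD, List.cons_append, List.nil_append,
        List.getElem?_cons_succ, List.getElem?_map, List.getElem?_eq_getElem hlt,
        List.getElem_range', Option.map_some, Option.getD_some]
      rw [show 1 + 1 * m = m + 1 from by omega, Nat.add_sub_cancel,
        ih (m + 1) hj, ih m (by omega)]
      cases m with
      | zero => simp [pvE]
      | succ p =>
        rw [show p + 1 + 1 - 2 = p from rfl, ih p (by omega)]
        simp only [pvE, if_pos (by omega : 2 ≤ p + 1 + 1), if_pos (by omega : 1 ≤ p + 1)]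
        rfl

-- ===== VERDICT (by name: the statement is the Claim_ definition above) =====
theorem get_bridge_combinations_spec : Claim_equal_get_bridge_combinations := by
  intro bridges num_bridges _
  unfold Spec_get_bridge_combinations get_bridge_combinations_alt
  split
  · rename_i h
    rcases h with h | h
    · exact A_nonpos bridges num_bridges h
    · exact A_big bridges num_bridges h
  · rename_i h
    push Not at h
    rw [A_eq_E bridges num_bridges (by omega)]
    exact (row_eq_E num_bridges.toNat bridges num_bridges.toNat le_rfl).symm
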